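-- pv_equiv track=rewrite | github.com/maximeusdin/friday | retrieval/ops.py | _min_token_distance
-- ===== SOURCE A (Python) =====
-- from typing import Any, Dict, Iterable, List, Optional, Sequence, Tuple
--
-- def _min_token_distance(toks: List[str], a: str, b: str) -> Optional[int]:
--     a = a.lower()
--     b = b.lower()
--     apos = [i for i, t in enumerate(toks) if t == a]
--     bpos = [i for i, t in enumerate(toks) if t == b]
--     if not apos or not bpos:
--         return None
--     best = None
--     for i in apos:
--         for j in bpos:
--             d = abs(i - j)
--             if best is None or d < best:
--                 best = d
--     return best
-- ===== SOURCE B (Python) =====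
-- def _min_token_distance(toks, a, b):
--     a = a.lower()
--     b = b.lower()
--     last_a = None
--     last_b = None
--     best = None
--     for i, t in enumerate(toks):
--         if t == a:
--             last_a = i
--             if last_b is not None:
--                 d = i - last_b
--                 if best is None or d < best:
--                     best = d
--         if t == b:
--             last_b = i
--             if last_a is not None:
--                 d = i - last_a
--                 if best is None or d < best:
--                     best = d
--     return best
-- ===== Notes on version B (the rewrite author's own statement) =====
-- stated objective: faster
-- what changed: Replaces the two position-list scans plus a nested product loop over all occurrence pairs with a single pass that tracks the last occurrence of each token and updates the minimum gap on the fly.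
import Mathlib
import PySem

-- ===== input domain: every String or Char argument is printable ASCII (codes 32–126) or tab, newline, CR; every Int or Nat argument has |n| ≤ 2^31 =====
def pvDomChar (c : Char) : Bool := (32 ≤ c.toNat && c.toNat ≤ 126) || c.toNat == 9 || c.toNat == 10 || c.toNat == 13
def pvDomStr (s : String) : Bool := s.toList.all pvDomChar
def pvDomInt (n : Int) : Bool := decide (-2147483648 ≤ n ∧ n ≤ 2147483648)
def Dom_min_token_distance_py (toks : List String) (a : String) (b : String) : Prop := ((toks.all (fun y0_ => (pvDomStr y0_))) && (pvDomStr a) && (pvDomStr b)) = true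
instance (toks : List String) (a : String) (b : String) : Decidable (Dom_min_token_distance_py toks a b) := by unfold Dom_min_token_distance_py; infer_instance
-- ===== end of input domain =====

-- B replaces A's nested loop over all occurrence pairs with a single pass tracking last occurrences (faster; return value only, no mutation).

-- ===== PORT A =====
-- A's inner 'if best is None or d < best: best = d'
def updA (best : Option Int) (d : Int) : Option Int :=
  match best with
  | none => some d
  | some bst => if d < bst then some d else some bst

def min_token_distance_py (toks : List String) (a : String) (b : String) : Option Int :=
  let a' := PySem.Str.lower a
  let b' := PySem.Str.lower b
  let apos := ((PySem.List.enumerate toks).filter (fun p => p.2 == a')).map (fun p => p.1)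
  let bpos := ((PySem.List.enumerate toks).filter (fun p => p.2 == b')).map (fun p => p.1)
  if apos = [] ∨ bpos = [] then none
  else apos.foldl (fun best i => bpos.foldl (fun best j => updA best |i - j|) best) none

-- ===== PORT B =====
-- B's 'if best is None or d < best: best = d'
def updB (best : Option Int) (d : Int) : Option Int :=
  match best with
  | none => some d
  | some bst => if d < bst then some d else some bst

-- one iteration of B's loop: state (last_a, last_b, best), element (i, t)
def stepB (x y : String) (s : Option Int × Option Int × Option Int) (pr : Int × String) :
    Option Int × Option Int × Option Int :=
  let i := pr.1
  let t := pr.2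
  let la := if t == x then some i else s.1
  let best := if t == x then (match s.2.1 with | none => s.2.2 | some j => updB s.2.2 (i - j)) else s.2.2
  let lb := if t == y then some i else s.2.1
  let best' := if t == y then (match la with | none => best | some j => updB best (i - j)) else best
  (la, lb, best')

def min_token_distance_py_alt (toks : List String) (a : String) (b : String) : Option Int :=
  let x := PySem.Str.lower a
  let y := PySem.Str.lower b
  ((PySem.List.enumerate toks).foldl (stepB x y) (none, none, none)).2.2

-- ===== PRECONDITION & SPEC =====
def Spec_min_token_distance_py (toks : List String) (a : String) (b : String) (out : Option Int) : Prop := out = min_token_distance_py_alt toks a b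
instance (toks : List String) (a : String) (b : String) (out : Option Int) : Decidable (Spec_min_token_distance_py toks a b out) := by unfold Spec_min_token_distance_py; infer_instance

-- ===== CLAIM (what is proved, stated in full; the proofs are below) =====
def Claim_equal_min_token_distance_py : Prop := ∀ (toks : List String) (a : String) (b : String), Dom_min_token_distance_py toks a b → Spec_min_token_distance_py toks a b (min_token_distance_py toks a b)

-- ===== LEMMAS AND PROOFS =====

-- positions of token x (as in A), and last occurrence (as tracked by B)
def pvPos (x : String) (toks : List String) : List Int :=
  ((PySem.List.enumerate toks).filter (fun p => p.2 == x)).map (fun p => p.1)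

def pvLast (x : String) (toks : List String) : Option Int :=
  (PySem.List.enumerate toks).foldl (fun acc p => if p.2 == x then some p.1 else acc) none

-- A's inner loop and A's nested-loop minimum
def pvInn (i : Int) (bp : List Int) (acc : Option Int) : Option Int :=
  bp.foldl (fun best j => updA best |i - j|) acc

def pvMM (ap bp : List Int) : Option Int :=
  ap.foldl (fun best i => pvInn i bp best) none

theorem updB_eq (o : Option Int) (d : Int) : updB o d = updA o d := rfl

theorem updA_swap (a : Option Int) (d e : Int) :
    updA (updA a d) e = updA (updA a e) d := by
  cases a with
  | none =>
      simp only [updA] <;> first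
        | (split_ifs <;> simp <;> omega)
        | (simp <;> try omega)
        | omega
        | rfl
  | some v =>
      by_cases h1 : d < v <;> by_cases h2 : e < v <;>
        simp only [updA, h1, h2, if_true, if_false] <;> first
        | (split_ifs <;> simp <;> omega)
        | (simp <;> try omega)
        | omega
        | rfl

theorem updA_absorb (a : Option Int) {d e : Int} (h : e ≤ d) :
    updA (updA a d) e = updA a e := by
  cases a with
  | none =>
      simp only [updA] <;> first
        | (split_ifs <;> simp <;> omega)
        | (simp <;> try omega)
        | omega
        | rfl
  | some v =>
      by_cases h1 : d < v <;> by_cases h2 : e < v <;>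
        simp only [updA, h1, h2, if_true, if_false] <;> first
        | (split_ifs <;> simp <;> omega)
        | (simp <;> try omega)
        | omega
        | rfl

theorem updA_noop (a : Option Int) {d e : Int} (h : d ≤ e) :
    updA (updA a d) e = updA a d := by
  cases a with
  | none =>
      simp only [updA] <;> first
        | (split_ifs <;> simp <;> omega)
        | (simp <;> try omega)
        | omega
        | rfl
  | some v =>
      by_cases h1 : d < v <;> by_cases h2 : e < v <;>
        simp only [updA, h1, h2, if_true, if_false] <;> first
        | (split_ifs <;> simp <;> omega)
        | (simp <;> try omega)
        | omega
        | rfl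

theorem fold_ge (g : Int → Int) (d : Int) :
    ∀ (l : List Int) (acc : Option Int), (∀ j ∈ l, d ≤ g j) →
      l.foldl (fun a j => updA a (g j)) (updA acc d) = updA acc d := by
  intro l
  induction l with
  | nil => intro acc _; rfl
  | cons x xs ih =>
      intro acc h
      have hx : d ≤ g x := h x List.mem_cons_self
      simp only [List.foldl_cons]
      rw [updA_noop _ hx]
      exact ih acc (fun j hj => h j (List.mem_cons_of_mem _ hj))

theorem fold_min_achieve (g : Int → Int) (j0 : Int) :
    ∀ (l : List Int) (acc : Option Int), j0 ∈ l → (∀ j ∈ l, g j0 ≤ g j) →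
      l.foldl (fun a j => updA a (g j)) acc = updA acc (g j0) := by
  intro l
  induction l with
  | nil => intro acc h; exact absurd h List.not_mem_nil
  | cons x xs ih =>
      intro acc hmem hb
      simp only [List.foldl_cons]
      by_cases hx : j0 ∈ xs
      · rw [ih (updA acc (g x)) hx (fun j hj => hb j (List.mem_cons_of_mem _ hj))]
        exact updA_absorb acc (hb x List.mem_cons_self)
      · have hj : j0 = x := by
          rcases List.mem_cons.mp hmem with h | h
          · exact h
          · exact absurd h hx
        subst hj
        exact fold_ge g (g j0) xs acc (fun j hj => hb j (List.mem_cons_of_mem _ hj))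

theorem inn_updA_comm (i : Int) (bp : List Int) :
    ∀ (acc : Option Int) (d : Int), pvInn i bp (updA acc d) = updA (pvInn i bp acc) d := by
  induction bp with
  | nil => intro acc d; rfl
  | cons x xs ih =>
      intro acc d
      simp only [pvInn, List.foldl_cons] at *
      rw [updA_swap acc d |i - x|, ih]

theorem innFold_updA_comm (bp : List Int) :
    ∀ (ap : List Int) (acc : Option Int) (d : Int),
      ap.foldl (fun b i => pvInn i bp b) (updA acc d) = updA (ap.foldl (fun b i => pvInn i bp b) acc) d := by
  intro ap
  induction ap with
  | nil => intro acc d; rfl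
  | cons x xs ih =>
      intro acc d
      simp only [List.foldl_cons]
      rw [inn_updA_comm x bp acc d, ih]

theorem fold_exchange (bp : List Int) (g : Int → Int) :
    ∀ (ap : List Int) (acc : Option Int),
      ap.foldl (fun b i => updA (pvInn i bp b) (g i)) acc
        = ap.foldl (fun b i => updA b (g i)) (ap.foldl (fun b i => pvInn i bp b) acc) := by
  intro ap
  induction ap with
  | nil => intro acc; rfl
  | cons x xs ih =>
      intro acc
      simp only [List.foldl_cons]
      rw [ih, innFold_updA_comm]

theorem pvMM_nil_right (ap : List Int) : pvMM ap [] = none := by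
  have h : ∀ acc : Option Int, ap.foldl (fun best i => pvInn i [] best) acc = acc := by
    induction ap with
    | nil => intro acc; rfl
    | cons x xs ih => intro acc; exact ih acc
  exact h none

-- 'update best with (n - last)': the value B folds in at index n
def pvUpdOpt (acc : Option Int) (n : Int) (o : Option Int) : Option Int :=
  match o with
  | none => acc
  | some j => updA acc (n - j)

-- the last occurrence achieves the minimal gap to a later index n
theorem inn_last (n : Int) (bp : List Int) (lb : Option Int)
    (hnone : lb = none → bp = [])
    (hsome : ∀ j0, lb = some j0 → j0 ∈ bp ∧ (∀ j ∈ bp, j ≤ j0) ∧ j0 ≤ n)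
    (acc : Option Int) :
    pvInn n bp acc = pvUpdOpt acc n lb := by
  cases lb with
  | none => simp [pvInn, pvUpdOpt, hnone rfl]
  | some j0 =>
      obtain ⟨hmem, hmax, hle⟩ := hsome j0 rfl
      have h := fold_min_achieve (fun j => |n - j|) j0 bp acc hmem
        (fun j hj => by
          have h2 := hmax j hj
          simp only [abs_of_nonneg (by omega : (0:Int) ≤ n - j0)]
          exact le_trans (by omega : n - j0 ≤ n - j) (le_abs_self _))
      simp only at h
      rw [pvInn] at *
      rw [h, abs_of_nonneg (by omega : (0:Int) ≤ n - j0)]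
      rfl

theorem outer_last (n : Int) (ap : List Int) (la : Option Int)
    (hnone : la = none → ap = [])
    (hsome : ∀ j0, la = some j0 → j0 ∈ ap ∧ (∀ j ∈ ap, j ≤ j0) ∧ j0 ≤ n)
    (acc : Option Int) :
    ap.foldl (fun b i => updA b |i - n|) acc = pvUpdOpt acc n la := by
  cases la with
  | none => simp [pvUpdOpt, hnone rfl]
  | some j0 =>
      obtain ⟨hmem, hmax, hle⟩ := hsome j0 rfl
      have h := fold_min_achieve (fun i => |i - n|) j0 ap acc hmem
        (fun i hi => by
          have h2 := hmax i hi
          simp only [abs_of_nonpos (by omega : j0 - n ≤ 0), neg_sub]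
          refine le_trans (by omega : n - j0 ≤ n - i) ?_
          rw [show n - i = -(i - n) by ring]
          exact neg_le_abs _)
      simp only at h
      rw [h, abs_of_nonpos (by omega : j0 - n ≤ 0), neg_sub]
      rfl

theorem MMsnocA (n : Int) (ap bp : List Int) (lb : Option Int)
    (hnone : lb = none → bp = [])
    (hsome : ∀ j0, lb = some j0 → j0 ∈ bp ∧ (∀ j ∈ bp, j ≤ j0) ∧ j0 ≤ n) :
    pvMM (ap ++ [n]) bp = pvUpdOpt (pvMM ap bp) n lb := by
  rw [pvMM, List.foldl_append, List.foldl_cons, List.foldl_nil]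
  exact inn_last n bp lb hnone hsome (pvMM ap bp)

theorem MMsnocB (n : Int) (ap bp : List Int) (la : Option Int)
    (hnone : la = none → ap = [])
    (hsome : ∀ j0, la = some j0 → j0 ∈ ap ∧ (∀ j ∈ ap, j ≤ j0) ∧ j0 ≤ n) :
    pvMM ap (bp ++ [n]) = pvUpdOpt (pvMM ap bp) n la := by
  have hfun : pvMM ap (bp ++ [n]) = ap.foldl (fun b i => updA (pvInn i bp b) |i - n|) none := by
    rw [pvMM]
    congr 1
    funext b i
    rw [pvInn, pvInn, List.foldl_append, List.foldl_cons, List.foldl_nil]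
  rw [hfun, fold_exchange bp (fun i => |i - n|) ap none]
  exact outer_last n ap la hnone hsome (ap.foldl (fun b i => pvInn i bp b) none)

theorem MMdiag (n : Int) (ap bp : List Int) (lb : Option Int)
    (hnone : lb = none → bp = [])
    (hsome : ∀ j0, lb = some j0 → j0 ∈ bp ∧ (∀ j ∈ bp, j ≤ j0) ∧ j0 ≤ n) :
    pvMM (ap ++ [n]) (bp ++ [n]) = updA (pvUpdOpt (pvMM ap bp) n lb) 0 := by
  have hfun : pvMM (ap ++ [n]) (bp ++ [n])
      = (ap ++ [n]).foldl (fun b i => updA (pvInn i bp b) |i - n|) none := by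
    rw [pvMM]
    congr 1
    funext b i
    rw [pvInn, pvInn, List.foldl_append, List.foldl_cons, List.foldl_nil]
  rw [hfun, fold_exchange bp (fun i => |i - n|) (ap ++ [n]) none]
  have hinner : (ap ++ [n]).foldl (fun b i => pvInn i bp b) none = pvInn n bp (pvMM ap bp) := by
    rw [List.foldl_append, List.foldl_cons, List.foldl_nil]; rfl
  rw [hinner, inn_last n bp lb hnone hsome]
  have hach := fold_min_achieve (fun i => |i - n|) n (ap ++ [n])
    (pvUpdOpt (pvMM ap bp) n lb)
    (by simp) (fun i _ => by simp [abs_nonneg])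
  simp only [sub_self, abs_zero] at hach
  exact hach

theorem pvPos_snoc (x : String) (p : List String) (t : String) :
    pvPos x (p ++ [t]) = pvPos x p ++ (if t == x then [(p.length : Int)] else []) := by
  simp only [pvPos, PySem.List.enumerate_append, List.filter_append, List.map_append]
  congr 1
  simp [PySem.List.enumerate_cons, PySem.List.enumerate_nil]
  split_ifs <;> simp_all

theorem pvLast_snoc (x : String) (p : List String) (t : String) :
    pvLast x (p ++ [t]) = if t == x then some (p.length : Int) else pvLast x p := by
  simp only [pvLast, PySem.List.enumerate_append, List.foldl_append]
  simp [PySem.List.enumerate_cons, PySem.List.enumerate_nil]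

theorem pvPos_bound (x : String) (p : List String) :
    ∀ j ∈ pvPos x p, 0 ≤ j ∧ j < (p.length : Int) := by
  intro j hj
  simp only [pvPos, List.mem_map, List.mem_filter] at hj
  obtain ⟨q, ⟨hq, _⟩, rfl⟩ := hj
  rw [PySem.List.mem_enumerate_iff] at hq
  obtain ⟨k, hk, rfl⟩ := hq
  refine ⟨by simp, ?_⟩
  simp
  exact_mod_cast hk

theorem pvLast_spec (x : String) (p : List String) :
    (pvLast x p = none → pvPos x p = []) ∧
    (∀ j0, pvLast x p = some j0 → j0 ∈ pvPos x p ∧ (∀ j ∈ pvPos x p, j ≤ j0) ∧ j0 ≤ (p.length : Int)) := by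
  induction p using List.reverseRecOn with
  | nil =>
      refine ⟨fun _ => rfl, fun j0 h => ?_⟩
      simp [pvLast, PySem.List.enumerate_nil] at h
  | append_singleton p t ih =>
      rw [pvLast_snoc, pvPos_snoc]
      cases ht : (t == x) with
      | false =>
          simp only [Bool.false_eq_true, if_false, List.append_nil]
          refine ⟨ih.1, fun j0 h => ?_⟩
          obtain ⟨h1, h2, h3⟩ := ih.2 j0 h
          refine ⟨h1, h2, ?_⟩
          simp only [List.length_append, List.length_cons, List.length_nil]
          push_cast
          omega
      | true =>
          simp only [if_true]
          refine ⟨fun h => by simp at h, fun j0 h => ?_⟩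
          have hj0 : j0 = (p.length : Int) := by
            simpa using h.symm
          subst hj0
          refine ⟨by simp, fun j hj => ?_, ?_⟩
          · rcases List.mem_append.mp hj with h1 | h1
            · exact le_of_lt (pvPos_bound x p j h1).2
            · simp at h1; omega
          · simp only [List.length_append, List.length_cons, List.length_nil]
            push_cast
            omega

theorem pvInv (x y : String) (p : List String) :
    (PySem.List.enumerate p).foldl (stepB x y) (none, none, none)
      = (pvLast x p, pvLast y p, pvMM (pvPos x p) (pvPos y p)) := by
  induction p using List.reverseRecOn with
  | nil => rfl
  | append_singleton p t ih =>
      rw [PySem.List.enumerate_append, List.foldl_append, ih]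
      have henum1 : PySem.List.enumerate [t] ((0 : Int) + p.length) = [((p.length : Int), t)] := by
        simp [PySem.List.enumerate_cons, PySem.List.enumerate_nil]
      rw [henum1, List.foldl_cons, List.foldl_nil, pvLast_snoc, pvLast_snoc, pvPos_snoc, pvPos_snoc]
      obtain ⟨hXn, hXs⟩ := pvLast_spec x p
      obtain ⟨hYn, hYs⟩ := pvLast_spec y p
      cases hx : (t == x) <;> cases hy : (t == y) <;>
        simp only [stepB, hx, hy, Bool.false_eq_true, if_false, if_true, List.append_nil, updB_eq]
      · rw [MMsnocB ((p.length : Int)) (pvPos x p) (pvPos y p) (pvLast x p) hXn hXs]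
        cases pvLast x p <;> rfl
      · rw [MMsnocA ((p.length : Int)) (pvPos x p) (pvPos y p) (pvLast y p) hYn hYs]
        cases pvLast y p <;> rfl
      · rw [MMdiag ((p.length : Int)) (pvPos x p) (pvPos y p) (pvLast y p) hYn hYs]
        simp only [sub_self]
        cases pvLast y p <;> rfl


theorem A_eq_MM (toks : List String) (a b : String) :
    min_token_distance_py toks a b
      = pvMM (pvPos (PySem.Str.lower a) toks) (pvPos (PySem.Str.lower b) toks) := by
  show (if pvPos (PySem.Str.lower a) toks = [] ∨ pvPos (PySem.Str.lower b) toks = [] then none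
        else (pvPos (PySem.Str.lower a) toks).foldl
          (fun best i => (pvPos (PySem.Str.lower b) toks).foldl (fun best j => updA best |i - j|) best) none)
      = _
  split_ifs with h
  · rcases h with h | h
    · rw [h]; rfl
    · rw [h, pvMM_nil_right]
  · rfl

-- ===== VERDICT (by name: the statement is the Claim_ definition above) =====
theorem min_token_distance_py_spec : Claim_equal_min_token_distance_py := by
  intro toks a b _
  unfold Spec_min_token_distance_py
  rw [A_eq_MM]
  show _ = ((PySem.List.enumerate toks).foldl (stepB (PySem.Str.lower a) (PySem.Str.lower b)) (none, none, none)).2.2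
  rw [pvInv]
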